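-- pv_equiv track=rewrite | github.com/ghmbegerez/converge | src/converge/analytics.py | _compute_coupling
-- ===== SOURCE A (Python) =====
-- from collections import Counter
-- from typing import Any
--
-- def _compute_coupling(entries: list[dict[str, Any]]) -> Counter[tuple[str, str]]:
--     """Compute file co-change coupling from log entries."""
--     coupling: Counter[tuple[str, str]] = Counter()
--     for e in entries:
--         files = sorted(set(e["files"]))
--         for i, f1 in enumerate(files):
--             for f2 in files[i + 1:]:
--                 coupling[(f1, f2)] += 1
--     return coupling
-- ===== SOURCE B (Python) =====
-- from collections import Counter
-- from typing import Any
--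
--
-- def _shared_count(occ: dict[str, list[int]], f1: str, f2: str) -> int:
--     """Size of the intersection of the two files' commit-index lists."""
--     s2 = set(occ[f2])
--     return len([i for i in occ[f1] if i in s2])
--
--
-- def _compute_coupling(entries: list[dict[str, Any]]) -> Counter[tuple[str, str]]:
--     """Inverted index: map each file to the indices of commits touching it; each
--     pair's coupling count is written once as an intersection size."""
--     file_lists = [sorted(set(e["files"])) for e in entries]
--     occ: dict[str, list[int]] = {}
--     for i, fs in enumerate(file_lists):
--         for f in fs:
--             occ.setdefault(f, []).append(i)
--     candidates = dict.fromkeys(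
--         (f1, f2) for fs in file_lists for f1 in fs for f2 in fs if f1 < f2)
--     coupling: Counter[tuple[str, str]] = Counter()
--     for f1, f2 in candidates:
--         coupling[(f1, f2)] = _shared_count(occ, f1, f2)
--     return coupling
-- ===== Notes on version B (the rewrite author's own statement) =====
-- stated objective: alternative
-- what changed: A increments a Counter entry per pair per commit; B builds an inverted index file->commit indices, dedups the candidate pair stream once, and writes each pair's final count a single time as the size of the intersection of the two files' commit-index lists.
import Mathlib
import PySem

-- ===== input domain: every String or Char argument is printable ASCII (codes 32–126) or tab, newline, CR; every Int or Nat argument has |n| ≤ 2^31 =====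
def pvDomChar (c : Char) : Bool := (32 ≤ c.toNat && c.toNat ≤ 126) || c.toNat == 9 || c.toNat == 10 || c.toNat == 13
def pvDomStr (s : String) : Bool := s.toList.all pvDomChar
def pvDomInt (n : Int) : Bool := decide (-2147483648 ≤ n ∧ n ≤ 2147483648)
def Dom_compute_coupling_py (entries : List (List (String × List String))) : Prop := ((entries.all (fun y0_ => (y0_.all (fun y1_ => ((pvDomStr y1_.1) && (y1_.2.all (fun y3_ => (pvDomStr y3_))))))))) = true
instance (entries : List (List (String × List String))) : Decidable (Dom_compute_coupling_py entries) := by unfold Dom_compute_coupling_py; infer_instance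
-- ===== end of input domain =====

-- B replaces A's per-commit Counter increments by an inverted index (file -> commit
-- indices); each pair's count is written once, as an intersection size (objective: alternative).

-- ===== PORT A =====
-- sorted(set(e["files"])): e["files"] raises KeyError when absent — excluded by Pre_ below;
-- the port reads the key with a [] default there.
def pvFilesOf (e : List (String × List String)) : List String :=
  PySem.List.sorted (PySem.Set.ofList ((PySem.Dict.get? (PySem.Dict.mk e) "files").getD [])) (fun x => x) false

def compute_coupling_py (entries : List (List (String × List String))) : List (String × String × Int) :=
  let coupling : PySem.Dict (String × String) Int :=
    entries.foldl (fun coupling e =>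
      let files := pvFilesOf e
      (PySem.List.enumerate files).foldl (fun coupling p =>
        (PySem.List.slice files (some (p.1 + 1)) none).foldl (fun coupling f2 =>
          coupling.modify (p.2, f2) 0 (· + 1)) coupling) coupling)
      PySem.Dict.empty
  coupling.items.map (fun q => (q.1.1, q.1.2, q.2))

-- ===== PORT B =====
-- for i, fs in enumerate(file_lists): for f in fs: occ.setdefault(f, []).append(i)
def pvOccBuild (fileLists : List (List String)) : PySem.Dict String (List Int) :=
  (PySem.List.enumerate fileLists).foldl (fun occ q =>
    q.2.foldl (fun occ f => occ.modify f [] (fun l => l ++ [q.1])) occ) PySem.Dict.empty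

-- ((f1, f2) for fs in file_lists for f1 in fs for f2 in fs if f1 < f2)
def pvLexPairs (fs : List String) : List (String × String) :=
  fs.flatMap (fun f1 => fs.flatMap (fun f2 => if f1 < f2 then [(f1, f2)] else []))

-- _shared_count(occ, f1, f2); occ[f] never misses on the candidate files — read with a [] default
def pvSharedCount (occ : PySem.Dict String (List Int)) (f1 f2 : String) : Int :=
  let s2 := PySem.Set.ofList (occ.getD f2 [])
  (((occ.getD f1 []).filter (fun i => decide (i ∈ s2))).length : Int)

def compute_coupling_py_alt (entries : List (List (String × List String))) : List (String × String × Int) :=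
  let fileLists := entries.map pvFilesOf
  let occ := pvOccBuild fileLists
  let candidates := PySem.List.dedup (fileLists.flatMap pvLexPairs)
  let coupling : PySem.Dict (String × String) Int :=
    candidates.foldl (fun d p => d.insert p (pvSharedCount occ p.1 p.2)) PySem.Dict.empty
  coupling.items.map (fun q => (q.1.1, q.1.2, q.2))

-- ===== PRECONDITION & SPEC =====
-- Pre_ excludes exactly the entries lacking a "files" key, where Python's e["files"] raises KeyError.
def Pre_compute_coupling_py (entries : List (List (String × List String))) : Prop :=
  (entries.all (fun e => ((PySem.Dict.get? (PySem.Dict.mk e) "files").isSome))) = true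
instance (entries : List (List (String × List String))) : Decidable (Pre_compute_coupling_py entries) := by unfold Pre_compute_coupling_py; infer_instance

def pvWitness_compute_coupling_py : (List (List (String × List String))) :=
  [[("files", ["b", "a", "c"])], [("files", ["a", "b"])]]

def Spec_compute_coupling_py (entries : List (List (String × List String))) (out : List (String × String × Int)) : Prop := out = compute_coupling_py_alt entries
instance (entries : List (List (String × List String))) (out : List (String × String × Int)) : Decidable (Spec_compute_coupling_py entries out) := by unfold Spec_compute_coupling_py; infer_instance

-- ===== CLAIM (what is proved, stated in full; the proofs are below) =====
def Claim_equal_compute_coupling_py : Prop := ∀ (entries : List (List (String × List String))), Dom_compute_coupling_py entries → Pre_compute_coupling_py entries → Spec_compute_coupling_py entries (compute_coupling_py entries)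

-- ===== LEMMAS AND PROOFS =====

-- the canonical per-commit pair list both ports enumerate
def canonPairs : List String → List (String × String)
  | [] => []
  | h :: t => t.map (fun f2 => (h, f2)) ++ canonPairs t

-- commit indices whose file list contains f, starting at index s
def occL (fl : List (List String)) (s : Int) (f : String) : List Int :=
  (PySem.List.enumerate fl s).flatMap (fun q => if f ∈ q.2 then [q.1] else [])

theorem pvFilesOf_pairwise (e : List (String × List String)) :
    (pvFilesOf e).Pairwise (· < ·) :=
  PySem.List.sorted_ofList_pairwise_lt _

theorem mem_canonPairs (p : String × String) : ∀ (l : List String),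
    p ∈ canonPairs l → p.1 ∈ l ∧ p.2 ∈ l := by
  intro l
  induction l with
  | nil => simp [canonPairs]
  | cons h t ih =>
      intro hp
      rw [canonPairs, List.mem_append] at hp
      rcases hp with hp | hp
      · obtain ⟨f2, hf2, rfl⟩ := List.mem_map.mp hp
        exact ⟨by simp, by simp [hf2]⟩
      · obtain ⟨h1, h2⟩ := ih hp
        exact ⟨by simp [h1], by simp [h2]⟩

theorem canonPairs_lt (p : String × String) : ∀ (l : List String),
    l.Pairwise (· < ·) → p ∈ canonPairs l → p.1 < p.2 := by
  intro l
  induction l with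
  | nil => simp [canonPairs]
  | cons h t ih =>
      intro hpw hp
      rw [List.pairwise_cons] at hpw
      rw [canonPairs, List.mem_append] at hp
      rcases hp with hp | hp
      · obtain ⟨f2, hf2, rfl⟩ := List.mem_map.mp hp
        exact hpw.1 _ hf2
      · exact ih hpw.2 hp

theorem count_canonPairs (a b : String) (hab : a < b) : ∀ (l : List String),
    l.Pairwise (· < ·) →
    (canonPairs l).count (a, b) = (if a ∈ l ∧ b ∈ l then 1 else 0) := by
  intro l
  induction l with
  | nil => simp [canonPairs]
  | cons h t ih =>
      intro hpw
      rw [List.pairwise_cons] at hpw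
      rw [canonPairs, List.count_append]
      by_cases hah : a = h
      · subst hah
        have hmap : (t.map (fun f2 => (a, f2))).count (a, b) = t.count b :=
          List.count_map_of_injective _ _ (fun x y hxy => by simpa using hxy) _
        have hcanon : (canonPairs t).count (a, b) = 0 := by
          rw [List.count_eq_zero]
          intro hmem
          exact lt_irrefl a (hpw.1 a (mem_canonPairs _ t hmem).1)
        rw [hmap, hcanon]
        have hbh : b ≠ a := ne_of_gt hab
        by_cases hbt : b ∈ t
        · rw [List.count_eq_one_of_mem (hpw.2.imp ne_of_lt) hbt]
          simp [hbt]
        · rw [List.count_eq_zero_of_not_mem hbt]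
          simp [hbt, hbh]
      · have hmap : (t.map (fun f2 => (h, f2))).count (a, b) = 0 := by
          rw [List.count_eq_zero]
          intro hmem
          obtain ⟨f2, _, heq⟩ := List.mem_map.mp hmem
          exact hah (by simpa using (Prod.mk.injEq .. ▸ heq).1.symm)
        rw [hmap, ih hpw.2]
        by_cases hat : a ∈ t
        · have hbne : b ≠ h := by
            intro hbh
            subst hbh
            exact absurd hab (Std.not_gt_of_lt (hpw.1 a hat))
          simp [hat, hah, hbne]
        · simp [hat, hah]

theorem flat_count (a b : String) (hab : a < b) : ∀ (fl : List (List String)),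
    (∀ fs ∈ fl, fs.Pairwise (· < ·)) →
    (fl.flatMap canonPairs).count (a, b)
      = (fl.map (fun fs => if a ∈ fs ∧ b ∈ fs then 1 else 0)).sum := by
  intro fl
  induction fl with
  | nil => simp
  | cons fs r ih =>
      intro hp
      rw [List.flatMap_cons, List.count_append, List.map_cons, List.sum_cons,
        count_canonPairs a b hab fs (hp fs (by simp)), ih (fun x hx => hp x (by simp [hx]))]

theorem occL_cons (fs : List String) (r : List (List String)) (s : Int) (f : String) :
    occL (fs :: r) s f = (if f ∈ fs then [s] else []) ++ occL r (s + 1) f := by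
  rw [occL, PySem.List.enumerate_cons, List.flatMap_cons, occL]

theorem occL_bound (f : String) : ∀ (fl : List (List String)) (s : Int),
    ∀ i ∈ occL fl s f, s ≤ i := by
  intro fl
  induction fl with
  | nil => intro s i hi; simp [occL, PySem.List.enumerate] at hi
  | cons fs r ih =>
      intro s i hi
      rw [occL_cons, List.mem_append] at hi
      rcases hi with hi | hi
      · split at hi <;> simp_all
      · have := ih (s + 1) i hi
        omega

theorem inter_len (a b : String) : ∀ (fl : List (List String)) (s : Int),
    ((occL fl s a).filter (fun i => decide (i ∈ occL fl s b))).length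
      = (fl.map (fun fs => if a ∈ fs ∧ b ∈ fs then 1 else 0)).sum := by
  intro fl
  induction fl with
  | nil => intro s; simp [occL, PySem.List.enumerate]
  | cons fs r ih =>
      intro s
      rw [occL_cons, occL_cons, List.filter_append, List.length_append]
      have htail : (occL r (s + 1) a).filter
            (fun i => decide (i ∈ (if b ∈ fs then [s] else []) ++ occL r (s + 1) b))
          = (occL r (s + 1) a).filter (fun i => decide (i ∈ occL r (s + 1) b)) := by
        apply List.filter_congr
        intro i hi
        have hsi : s + 1 ≤ i := occL_bound a r (s + 1) i hi
        have : i ≠ s := by omega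
        split <;> simp [this]
      rw [htail, ih (s + 1), List.map_cons, List.sum_cons]
      have hhead : ((if a ∈ fs then [s] else []).filter
            (fun i => decide (i ∈ (if b ∈ fs then [s] else []) ++ occL r (s + 1) b))).length
          = (if a ∈ fs ∧ b ∈ fs then 1 else 0) := by
        have hsnot : s ∉ occL r (s + 1) b := fun h => by
          have := occL_bound b r (s + 1) s h; omega
        by_cases ha : a ∈ fs <;> by_cases hb : b ∈ fs <;>
          simp [ha, hb, List.filter, hsnot]
      rw [hhead]

-- the nodup-per-block characterisation of one block of the occ dict
theorem block_occ (fs : List String) (hnd : fs.Nodup) (i : Int) (f : String) :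
    ((fs.map (fun f' => (f', i))).filter (fun p => p.1 == f)).map (fun p => p.2)
      = if f ∈ fs then [i] else [] := by
  rw [List.filter_map]
  have : ((fun p : String × Int => p.1 == f) ∘ (fun f' => (f', i))) = (fun f' => f' == f) := rfl
  rw [this, List.filter_beq, List.map_map, List.map_replicate]
  by_cases hm : f ∈ fs
  · rw [List.count_eq_one_of_mem hnd hm]; simp [hm]
  · rw [List.count_eq_zero_of_not_mem hm]; simp [hm]

theorem occ_getD (fl : List (List String)) (hnd : ∀ fs ∈ fl, fs.Nodup) (f : String) :
    (pvOccBuild fl).getD f [] = occL fl 0 f := by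
  have hfold : pvOccBuild fl
      = ((PySem.List.enumerate fl).flatMap (fun q => q.2.map (fun f' => (f', q.1)))).foldl
          (fun d p => d.modify p.1 [] (fun l => l ++ [p.2])) PySem.Dict.empty := by
    rw [pvOccBuild, List.foldl_flatMap]
    simp [List.foldl_map]
  rw [hfold, PySem.Dict.getD_foldl_modify_append, PySem.Dict.getD_empty, List.nil_append,
    List.filter_flatMap, List.map_flatMap, occL]
  apply List.flatMap_congr
  intro q hq
  obtain ⟨k, hk, rfl⟩ := (PySem.List.mem_enumerate_iff fl 0 q).mp hq
  exact block_occ _ (hnd _ (List.getElem_mem hk)) _ f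

theorem shared_count_eq (fl : List (List String)) (hp : ∀ fs ∈ fl, fs.Pairwise (· < ·))
    (a b : String) (hab : a < b) :
    pvSharedCount (pvOccBuild fl) a b = ((fl.flatMap canonPairs).count (a, b) : Int) := by
  have hnd : ∀ fs ∈ fl, fs.Nodup := fun fs h => (hp fs h).imp ne_of_lt
  rw [pvSharedCount, occ_getD fl hnd a, occ_getD fl hnd b]
  have hpred : ((occL fl 0 a).filter (fun i => decide (i ∈ PySem.Set.ofList (occL fl 0 b))))
      = ((occL fl 0 a).filter (fun i => decide (i ∈ occL fl 0 b))) := by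
    apply List.filter_congr
    intro i _
    simp [PySem.Set.mem_ofList]
  simp only [hpred]
  rw [inter_len a b fl 0, flat_count a b hab fl hp]

theorem enumerate_slice_pairs (rest : List String) : ∀ (pre : List String),
    (PySem.List.enumerate rest (pre.length : Int)).flatMap
      (fun p => (PySem.List.slice (pre ++ rest) (some (p.1 + 1)) none).map (fun f2 => (p.2, f2)))
    = canonPairs rest := by
  induction rest with
  | nil => intro pre; simp [PySem.List.enumerate, canonPairs]
  | cons h t ih =>
      intro pre
      rw [PySem.List.enumerate_cons, List.flatMap_cons, canonPairs]
      have h1 : PySem.List.slice (pre ++ h :: t) (some ((pre.length : Int) + 1)) none = t := by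
        rw [PySem.List.slice_from _ (show (0:Int) ≤ (pre.length : Int) + 1 by omega)]
        rw [show ((pre.length : Int) + 1).toNat = pre.length + 1 from by omega]
        rw [show pre ++ h :: t = (pre ++ [h]) ++ t from by simp]
        rw [List.drop_append_of_le_length (by simp)]
        simp
      congr 1
      · show (PySem.List.slice (pre ++ h :: t) (some ((pre.length : Int) + 1)) none).map
            (fun f2 => (h, f2)) = t.map (fun f2 => (h, f2))
        rw [h1]
      · have hmk := ih (pre ++ [h])
        simp only [List.length_append, List.length_cons, List.length_nil, Nat.cast_add,
          Nat.cast_one, zero_add, List.append_assoc, List.cons_append,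
          List.nil_append] at hmk ⊢
        exact hmk

theorem per_entry_fold (files : List String) (d : PySem.Dict (String × String) Int) :
    (PySem.List.enumerate files).foldl (fun coupling p =>
        (PySem.List.slice files (some (p.1 + 1)) none).foldl (fun coupling f2 =>
          coupling.modify (p.2, f2) 0 (· + 1)) coupling) d
    = (canonPairs files).foldl (fun d x => d.modify x 0 (· + 1)) d := by
  have h := enumerate_slice_pairs files []
  simp only [List.nil_append, List.length_nil, Nat.cast_zero] at h
  rw [← h, List.foldl_flatMap]
  simp [List.foldl_map]

theorem a_dict_eq (entries : List (List (String × List String))) :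
    (entries.foldl (fun coupling e =>
      (PySem.List.enumerate (pvFilesOf e)).foldl (fun coupling p =>
        (PySem.List.slice (pvFilesOf e) (some (p.1 + 1)) none).foldl (fun coupling f2 =>
          coupling.modify (p.2, f2) 0 (· + 1)) coupling) coupling) PySem.Dict.empty)
    = PySem.Dict.counter ((entries.map pvFilesOf).flatMap canonPairs) := by
  rw [PySem.Dict.counter_eq_foldl, List.foldl_flatMap, List.foldl_map]
  exact List.foldl_ext _ _ _ (fun d e _ => per_entry_fold (pvFilesOf e) d)

theorem lexPairs_eq_canon : ∀ (fs : List String), fs.Pairwise (· < ·) →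
    pvLexPairs fs = canonPairs fs := by
  intro fs
  induction fs with
  | nil => intro _; rfl
  | cons h t ih =>
      intro hpw
      rw [List.pairwise_cons] at hpw
      rw [pvLexPairs, List.flatMap_cons, canonPairs]
      congr 1
      · -- inner loop for f1 = h over h :: t
        rw [List.flatMap_cons, if_neg (lt_irrefl h), List.nil_append]
        rw [List.flatMap_congr (fun f2 hf2 => if_pos (hpw.1 f2 hf2)), List.map_eq_flatMap]
      · -- outer loop over t: the head h never passes the test f1 < h
        rw [← ih hpw.2, pvLexPairs]
        apply List.flatMap_congr
        intro f1 hf1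
        rw [List.flatMap_cons, if_neg (Std.not_gt_of_lt (hpw.1 f1 hf1)), List.nil_append]

-- ===== VERDICT (by name: the statement is the Claim_ definition above) =====
theorem compute_coupling_py_spec : Claim_equal_compute_coupling_py := by
  intro entries _ _
  show compute_coupling_py entries = compute_coupling_py_alt entries
  have hp : ∀ fs ∈ entries.map pvFilesOf, fs.Pairwise (· < ·) := by
    intro fs hfs
    obtain ⟨e, _, rfl⟩ := List.mem_map.mp hfs
    exact pvFilesOf_pairwise e
  simp only [compute_coupling_py, compute_coupling_py_alt]
  rw [a_dict_eq, List.flatMap_congr (f := pvLexPairs) (g := canonPairs)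
      (fun fs hfs => lexPairs_eq_canon fs (hp fs hfs))]
  rw [PySem.Dict.items_counter, PySem.List.dedup_eq_ofList]
  have hfresh := PySem.Dict.items_foldl_insert_fresh
      (PySem.Set.ofList ((entries.map pvFilesOf).flatMap canonPairs))
      (fun p : String × String => p)
      (fun p : String × String => pvSharedCount (pvOccBuild (entries.map pvFilesOf)) p.1 p.2)
      (PySem.Dict.empty)
      (by intro a _; simp [pysem])
      (by simp)
  rw [hfresh]
  have hemp : (PySem.Dict.empty : PySem.Dict (String × String) Int).items = [] := rfl
  rw [hemp, List.nil_append]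
  simp only [List.map_map]
  apply List.map_congr_left
  intro p hpmem
  have hpmem' : p ∈ (entries.map pvFilesOf).flatMap canonPairs :=
    (PySem.Set.mem_ofList _ _).mp hpmem
  obtain ⟨fs, hfs, hpfs⟩ := List.mem_flatMap.mp hpmem'
  have hab : p.1 < p.2 := canonPairs_lt p fs (hp fs hfs) hpfs
  simp only [Function.comp]
  rw [shared_count_eq (entries.map pvFilesOf) hp p.1 p.2 hab]
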